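-- pv_equiv track=rewrite | github.com/cognivore/openchessvision | src/openchessvision/core/fen.py | fen_to_piece_map
-- ===== SOURCE A (Python) =====
-- FILES = "abcdefgh"
--
-- def fen_to_piece_map(fen: str) -> dict[str, str]:
--     """
--     Convert a FEN string to a piece map.
--
--     Args:
--         fen: A FEN string (only the piece placement field is used)
--
--     Returns:
--         A dict mapping square names to piece symbols (e.g., {"e1": "K", "e8": "k"})
--     """
--     placement = fen.split()[0]
--     piece_map: dict[str, str] = {}
--
--     ranks = placement.split("/")
--
--     for rank_idx, rank_str in enumerate(ranks):
--         file_idx = 0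
--         rank_num = 8 - rank_idx  # FEN ranks go from 8 to 1
--
--         for char in rank_str:
--             if char.isdigit():
--                 file_idx += int(char)
--             else:
--                 square = FILES[file_idx] + str(rank_num)
--                 piece_map[square] = char
--                 file_idx += 1
--
--     return piece_map
-- ===== SOURCE B (Python) =====
-- FILES = "abcdefgh"
--
-- def fen_to_piece_map(fen: str) -> dict[str, str]:
--     """Same result as A: per rank, first expand digits into None slots,
--     then place pieces by positional enumeration (no running file counter)."""
--     placement = fen.split()[0]
--     piece_map: dict[str, str] = {}
--     for rank_idx, rank_str in enumerate(placement.split("/")):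
--         expanded: list = []
--         for ch in rank_str:
--             if ch.isdigit():
--                 expanded.extend([None] * int(ch))
--             else:
--                 expanded.append(ch)
--         rank_num = str(8 - rank_idx)
--         for i, ch in enumerate(expanded):
--             if ch is not None:
--                 piece_map[FILES[i] + rank_num] = ch
--     return piece_map
-- ===== Notes on version B (the rewrite author's own statement) =====
-- stated objective: alternative
-- what changed: B replaces A's running file-index counter with a per-rank pre-pass that expands each digit into that many empty (None) slots and then places pieces by positional enumeration over the expanded rank.
import Mathlib
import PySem

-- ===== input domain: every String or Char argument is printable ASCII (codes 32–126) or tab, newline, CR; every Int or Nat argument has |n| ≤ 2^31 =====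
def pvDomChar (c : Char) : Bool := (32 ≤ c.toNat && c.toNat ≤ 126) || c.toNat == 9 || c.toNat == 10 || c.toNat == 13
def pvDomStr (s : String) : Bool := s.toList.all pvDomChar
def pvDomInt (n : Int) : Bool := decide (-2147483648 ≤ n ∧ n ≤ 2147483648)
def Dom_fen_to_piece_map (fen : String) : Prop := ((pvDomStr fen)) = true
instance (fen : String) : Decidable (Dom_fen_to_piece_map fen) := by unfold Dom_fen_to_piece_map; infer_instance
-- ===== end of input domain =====

-- B replaces A's running file-index counter by a per-rank digit-expansion pre-pass
-- (digits become empty slots) followed by positional enumeration: a different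
-- decomposition of the same conversion, not faster.

-- the module constant FILES = "abcdefgh" (shared by both Pythons)
def fenFILES : List Char := ['a', 'b', 'c', 'd', 'e', 'f', 'g', 'h']

-- ===== PORT A =====
-- A's inner loop: running (file_idx, piece_map) state over the rank's characters.
-- FILES[file_idx] is ported as pyGetD (Python raises IndexError where the index is
-- out of range; those inputs are excluded by Pre_ below).
def fenRankA (rankIdx : Int) (rank : List Char) (d : PySem.Dict String String) :
    PySem.Dict String String :=
  (rank.foldl
    (fun (st : Int × PySem.Dict String String) c =>
      if PySem.Chars.isdigit c then
        (st.1 + (PySem.Int.ofChars? [c]).getD 0, st.2)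
      else
        (st.1 + 1,
         st.2.insert
           (String.mk (PySem.List.pyGetD fenFILES st.1 ' ' :: PySem.Int.toChars (8 - rankIdx)))
           (String.mk [c])))
    (0, d)).2

def fen_to_piece_map (fen : String) : List (String × String) :=
  let placement := PySem.List.pyGetD (PySem.Str.split₀ fen) 0 ""
  let ranks := PySem.Chars.splitOn placement.toList ['/']
  ((PySem.List.enumerate ranks).foldl (fun d p => fenRankA p.1 p.2 d)
    PySem.Dict.empty).items

-- ===== PORT B =====
-- B's pre-pass: each digit d becomes d empty (none) slots, each piece keeps one slot.
def fenExpand (rank : List Char) : List (Option Char) :=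
  rank.foldl
    (fun acc c =>
      if PySem.Chars.isdigit c then
        acc ++ PySem.List.pyRepeat [none] ((PySem.Int.ofChars? [c]).getD 0)
      else acc ++ [some c])
    []

-- B's inner loop: positional enumeration over the expanded rank.
def fenRankB (rankIdx : Int) (rank : List Char) (d : PySem.Dict String String) :
    PySem.Dict String String :=
  let rn := PySem.Int.toChars (8 - rankIdx)
  (PySem.List.enumerate (fenExpand rank)).foldl
    (fun d p =>
      match p.2 with
      | none => d
      | some c => d.insert (String.mk (PySem.List.pyGetD fenFILES p.1 ' ' :: rn)) (String.mk [c]))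
    d

def fen_to_piece_map_alt (fen : String) : List (String × String) :=
  let placement := PySem.List.pyGetD (PySem.Str.split₀ fen) 0 ""
  let ranks := PySem.Chars.splitOn placement.toList ['/']
  ((PySem.List.enumerate ranks).foldl (fun d p => fenRankB p.1 p.2 d)
    PySem.Dict.empty).items

-- ===== PRECONDITION & SPEC =====
-- weight of a rank prefix: a digit advances the file index by its value, a piece by 1
def fenPrefixWeight (cs : List Char) : Int :=
  (cs.map (fun c => if PySem.Chars.isdigit c then (c.toNat : Int) - 48 else 1)).sum

-- Pre_ excludes exactly the inputs on which Python A raises: an empty fen.split()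
-- (IndexError on [0]) and ranks where some piece character sits at file index ≥ 8
-- (IndexError on FILES[file_idx]).
def Pre_fen_to_piece_map (fen : String) : Prop :=
  PySem.Str.split₀ fen ≠ [] ∧
  ∀ rs ∈ PySem.Chars.splitOn (PySem.List.pyGetD (PySem.Str.split₀ fen) 0 "").toList ['/'],
    ∀ k, k < rs.length → PySem.Chars.isdigit (rs.getD k '0') = false →
      fenPrefixWeight (rs.take k) ≤ 7

instance (fen : String) : Decidable (Pre_fen_to_piece_map fen) := by
  unfold Pre_fen_to_piece_map; infer_instance

def pvWitness_fen_to_piece_map : String := "rnbq1k2/8/8/8/8/8/PPP5/K7 w - - 0 1"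

def Spec_fen_to_piece_map (fen : String) (out : List (String × String)) : Prop :=
  out = fen_to_piece_map_alt fen
instance (fen : String) (out : List (String × String)) : Decidable (Spec_fen_to_piece_map fen out) := by
  unfold Spec_fen_to_piece_map; infer_instance

-- ===== CLAIM (what is proved, stated in full; the proofs are below) =====
def Claim_equal_fen_to_piece_map : Prop := ∀ (fen : String), Dom_fen_to_piece_map fen → Pre_fen_to_piece_map fen → Spec_fen_to_piece_map fen (fen_to_piece_map fen)

-- ===== LEMMAS AND PROOFS =====

theorem fen_digit_ofChars (c : Char) (h : PySem.Chars.isdigit c = true) :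
    PySem.Int.ofChars? [c] = some ((c.toNat : Int) - 48) := by
  simp [PySem.Chars.isdigit, Char.le_def, UInt32.le_iff_toNat_le] at h
  have h1 : 48 ≤ c.toNat := h.1
  have h2 : c.toNat ≤ 57 := h.2
  have hc : c = Char.ofNat c.toNat := (Char.ofNat_toNat c).symm
  rw [hc]
  generalize c.toNat = n at h1 h2 ⊢
  interval_cases n <;> decide

theorem fen_digit_ge (c : Char) (h : PySem.Chars.isdigit c = true) : 48 ≤ c.toNat := by
  simp [PySem.Chars.isdigit, Char.le_def, UInt32.le_iff_toNat_le] at h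
  exact h.1

-- B's expansion is the flatMap of the per-character expansion
theorem fenExpand_eq_flatMap (cs : List Char) :
    fenExpand cs = cs.flatMap (fun c =>
      if PySem.Chars.isdigit c then
        PySem.List.pyRepeat [none] ((PySem.Int.ofChars? [c]).getD 0)
      else [some c]) := by
  unfold fenExpand
  rw [show (fun (acc : List (Option Char)) c =>
      if PySem.Chars.isdigit c then
        acc ++ PySem.List.pyRepeat [none] ((PySem.Int.ofChars? [c]).getD 0)
      else acc ++ [some c]) = (fun acc c => acc ++
        (if PySem.Chars.isdigit c then
          PySem.List.pyRepeat [none] ((PySem.Int.ofChars? [c]).getD 0)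
        else [some c])) from by
    funext acc c; split <;> rfl]
  rw [PySem.List.foldl_append_eq_flatMap]
  rfl

-- B's inner loop skips a block of empty slots unchanged
theorem fenB_skip_none (ri : Int) (n : Nat) :
    ∀ (s : Int) (d : PySem.Dict String String),
    (PySem.List.enumerate (List.replicate n (none : Option Char)) s).foldl
      (fun d p =>
        match p.2 with
        | none => d
        | some c =>
            d.insert
              (String.mk (PySem.List.pyGetD fenFILES p.1 ' ' :: PySem.Int.toChars (8 - ri)))
              (String.mk [c]))
      d = d := by
  induction n with
  | zero => intro s d; rfl
  | succ m ih =>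
      intro s d
      rw [List.replicate_succ, PySem.List.enumerate_cons, List.foldl_cons]
      exact ih (s + 1) d

-- the key invariant: A's counter loop from file index i equals B's enumeration
-- of the expanded rank starting at i
theorem fen_rank_inner (ri : Int) (cs : List Char) :
    ∀ (i : Int) (d : PySem.Dict String String),
    (cs.foldl
      (fun (st : Int × PySem.Dict String String) c =>
        if PySem.Chars.isdigit c then
          (st.1 + (PySem.Int.ofChars? [c]).getD 0, st.2)
        else
          (st.1 + 1,
           st.2.insert
             (String.mk (PySem.List.pyGetD fenFILES st.1 ' ' :: PySem.Int.toChars (8 - ri)))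
             (String.mk [c])))
      (i, d)).2 =
    (PySem.List.enumerate (cs.flatMap (fun c =>
        if PySem.Chars.isdigit c then
          PySem.List.pyRepeat [none] ((PySem.Int.ofChars? [c]).getD 0)
        else [some c])) i).foldl
      (fun d p =>
        match p.2 with
        | none => d
        | some c =>
            d.insert
              (String.mk (PySem.List.pyGetD fenFILES p.1 ' ' :: PySem.Int.toChars (8 - ri)))
              (String.mk [c]))
      d := by
  induction cs with
  | nil => intro i d; rfl
  | cons c cs ih =>
      intro i d
      rw [List.foldl_cons, List.flatMap_cons, PySem.List.enumerate_append, List.foldl_append]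
      by_cases hdig : PySem.Chars.isdigit c = true
      · have hv : (PySem.Int.ofChars? [c]).getD 0 = (c.toNat : Int) - 48 := by
          rw [fen_digit_ofChars c hdig]; rfl
        have hge := fen_digit_ge c hdig
        simp only [hdig, if_true]
        rw [PySem.List.pyRepeat_singleton, fenB_skip_none ri _ i d, ih,
          List.length_replicate]
        have hidx : i + ((((PySem.Int.ofChars? [c]).getD 0).toNat : Nat) : Int)
            = i + (PySem.Int.ofChars? [c]).getD 0 := by rw [hv]; omega
        rw [hidx]
      · simp only [hdig, if_false, Bool.false_eq_true]
        rw [PySem.List.enumerate_cons, PySem.List.enumerate_nil, List.foldl_cons, List.foldl_nil, ih]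
        rfl

-- per rank, A's loop equals B's loop
theorem fen_rank_eq (ri : Int) (rs : List Char) (d : PySem.Dict String String) :
    fenRankA ri rs d = fenRankB ri rs d := by
  unfold fenRankA fenRankB
  rw [fenExpand_eq_flatMap]
  exact fen_rank_inner ri rs 0 d

-- ===== VERDICT (by name: the statement is the Claim_ definition above) =====
theorem fen_to_piece_map_spec : Claim_equal_fen_to_piece_map := by
  intro fen _ _
  unfold Spec_fen_to_piece_map fen_to_piece_map fen_to_piece_map_alt
  have : (fun (d : PySem.Dict String String) (p : Int × List Char) => fenRankA p.1 p.2 d)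
       = (fun d p => fenRankB p.1 p.2 d) := by
    funext d p; exact fen_rank_eq p.1 p.2 d
  rw [this]
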